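-- pv_equiv track=rewrite | github.com/jiaw1/Python | osa05-11_kertomat/src/kertomat.py | kertomat
-- ===== SOURCE A (Python) =====
-- def kertomat(n: int):
--     sanakirja = {}
--     kertoma = 1
--     i = 1
--     while i<=n:
--         kertoma *= i
--         sanakirja[i] = kertoma
--         i += 1
--     return sanakirja
-- ===== SOURCE B (Python) =====
-- import math
--
--
-- def kertomat(n: int):
--     return {i: math.factorial(i) for i in range(1, n + 1)}
-- ===== Notes on version B (the rewrite author's own statement) =====
-- stated objective: simpler
-- what changed: Replaces the while-loop with a running-product accumulator by a one-line dict comprehension over range(1, n+1) that computes each entry independently with math.factorial.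
import Mathlib
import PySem

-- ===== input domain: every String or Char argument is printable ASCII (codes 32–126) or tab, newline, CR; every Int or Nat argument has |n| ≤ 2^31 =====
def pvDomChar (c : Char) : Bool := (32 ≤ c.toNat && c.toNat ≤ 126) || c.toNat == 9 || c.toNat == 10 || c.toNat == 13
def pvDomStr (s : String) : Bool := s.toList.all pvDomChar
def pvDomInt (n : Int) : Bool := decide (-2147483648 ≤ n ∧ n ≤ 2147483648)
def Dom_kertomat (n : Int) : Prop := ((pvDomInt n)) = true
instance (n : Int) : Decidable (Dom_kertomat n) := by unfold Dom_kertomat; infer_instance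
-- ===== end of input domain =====

-- B replaces the while-loop with its running-product accumulator by a dict comprehension
-- computing each factorial independently (objective: simpler).

-- ===== PORT A =====
-- the while-loop of A: state (sanakirja, kertoma, i)
def kertomatLoop (n i kertoma : Int) (d : PySem.Dict Int Int) : PySem.Dict Int Int :=
  if _h : i ≤ n then
    kertomatLoop n (i + 1) (kertoma * i) ((PySem.Dict.insert d i (kertoma * i)))
  else d
termination_by (n + 1 - i).toNat
decreasing_by omega

def kertomat (n : Int) : List (Int × Int) :=
  (kertomatLoop n 1 1 PySem.Dict.empty).items

-- ===== PORT B =====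
-- math.factorial(i) for an int i ≥ 1
def pyFactorial (i : Int) : Int := (Nat.factorial i.toNat : Int)

def kertomat_alt (n : Int) : List (Int × Int) :=
  (PySem.List.pyRange 1 (n + 1) 1).map (fun i => (i, pyFactorial i))

-- ===== PRECONDITION & SPEC =====
def Spec_kertomat (n : Int) (out : List (Int × Int)) : Prop := out = kertomat_alt n
instance (n : Int) (out : List (Int × Int)) : Decidable (Spec_kertomat n out) := by unfold Spec_kertomat; infer_instance

-- ===== CLAIM (what is proved, stated in full; the proofs are below) =====
def Claim_equal_kertomat : Prop := ∀ (n : Int), Dom_kertomat n → Spec_kertomat n (kertomat n)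

-- ===== LEMMAS AND PROOFS =====
lemma pyFactorial_step (i : Int) (hi : 1 ≤ i) :
    pyFactorial (i - 1) * i = pyFactorial i := by
  unfold pyFactorial
  have h : i.toNat = (i - 1).toNat + 1 := by omega
  rw [h, Nat.factorial_succ]
  push_cast
  have : ((i - 1).toNat : Int) = i - 1 := by omega
  rw [this]
  ring

lemma kertomatLoop_items (m : Nat) : ∀ (n i : Int), (n + 1 - i).toNat = m → 1 ≤ i →
    ∀ (d : PySem.Dict Int Int), (∀ p ∈ d.items, p.1 < i) →
    (kertomatLoop n i (pyFactorial (i - 1)) d).items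
      = d.items ++ (PySem.List.pyRange i (n + 1) 1).map (fun j => (j, pyFactorial j)) := by
  induction m with
  | zero =>
    intro n i hm hi d _hd
    rw [kertomatLoop]
    have hni : ¬ i ≤ n := by omega
    rw [dif_neg hni, PySem.List.pyRange_one_eq_nil (by omega)]
    simp
  | succ k ih =>
    intro n i hm hi d hd
    rw [kertomatLoop]
    by_cases hni : i ≤ n
    · rw [dif_pos hni]
      have hstep : pyFactorial (i - 1) * i = pyFactorial i := pyFactorial_step i hi
      have hstep' : pyFactorial i = pyFactorial ((i + 1) - 1) := by norm_num
      have hcont : d.contains i = false := by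
        rw [← Bool.not_eq_true, PySem.Dict.contains_iff_mem_keys]
        intro hmem
        simp only [PySem.Dict.keys, List.mem_map] at hmem
        obtain ⟨p, hp, hpe⟩ := hmem
        have := hd p hp
        omega
      have hrec := ih n (i + 1) (by omega) (by omega)
        (PySem.Dict.insert d i (pyFactorial (i - 1) * i))
        (by
          intro p hp
          rw [PySem.Dict.mem_items_insert] at hp
          rcases hp with h | ⟨h, _⟩
          · subst h
            simp only []
            omega
          · have := hd p h; omega)
      rw [hstep, hstep'] at hrec
      rw [hstep, hstep', hrec,
        PySem.Dict.items_insert_of_not_contains d _ hcont,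
        PySem.List.pyRange_one_cons (show i < n + 1 by omega)]
      have h11 : i + 1 - 1 = i := by ring
      rw [h11]
      simp
    · rw [dif_neg hni, PySem.List.pyRange_one_eq_nil (by omega)]
      simp

-- ===== VERDICT (by name: the statement is the Claim_ definition above) =====
theorem kertomat_spec : Claim_equal_kertomat := by
  intro n _
  unfold Spec_kertomat kertomat kertomat_alt
  have h := kertomatLoop_items (n + 1 - 1).toNat n 1 rfl le_rfl PySem.Dict.empty
    (by intro p hp; simp [PySem.Dict.empty] at hp)
  have h1 : pyFactorial (1 - 1) = 1 := by decide
  rw [h1] at h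
  rw [h]
  simp [PySem.Dict.empty]
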